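-- pv_equiv track=rewrite | github.com/Sager1145/Rina-Chan-board-370-leds | esp32s3_firmware/esp32s3_network.py | _static_path_to_file
-- ===== SOURCE A (Python) =====
-- WEBUI_GZIP_FILE = "webui_index.html.gz"
--
-- def _url_decode(s):
--     # Logic: Branches when isinstance(s, bytes) so the correct firmware path runs.
--     if isinstance(s, bytes):
--         # Error handling: Attempts the protected operation so failures can be handled safely.
--         try:
--             # Variable: s stores the result returned by s.decode().
--             s = s.decode("ascii", "ignore")
--         # Error handling: Runs this recovery branch when the protected operation fails.
--         except Exception:
--             # Variable: s stores the result returned by str().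
--             s = str(s)
--     # Variable: out stores the result returned by bytearray().
--     out = bytearray()
--     # Variable: i stores the configured literal value.
--     i = 0
--     # Variable: n stores the result returned by len().
--     n = len(s)
--     # Loop: Repeats while i < n remains true.
--     while i < n:
--         # Variable: c stores the selected item s[i].
--         c = s[i]
--         # Logic: Branches when c == "+" so the correct firmware path runs.
--         if c == "+":
--             # Expression: Calls out.append() for its side effects.
--             out.append(32)
--             # Variable: Updates i in place using the configured literal value.
--             i += 1
--             # Control: Skips to the next loop iteration after this case is handled.
--             continue
--         # Logic: Branches when c == "%" and i + 2 < n so the correct firmware path runs.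
--         if c == "%" and i + 2 < n:
--             # Error handling: Attempts the protected operation so failures can be handled safely.
--             try:
--                 # Expression: Calls out.append() for its side effects.
--                 out.append(int(s[i + 1:i + 3], 16))
--                 # Variable: Updates i in place using the configured literal value.
--                 i += 3
--                 # Control: Skips to the next loop iteration after this case is handled.
--                 continue
--             # Error handling: Runs this recovery branch when the protected operation fails.
--             except Exception:
--                 # Control: Leaves this branch intentionally empty.
--                 pass
--         # Error handling: Attempts the protected operation so failures can be handled safely.
--         try:
--             # Expression: Calls out.extend() for its side effects.
--             out.extend(c.encode("utf-8"))
--         # Error handling: Runs this recovery branch when the protected operation fails.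
--         except Exception:
--             # Expression: Calls out.append() for its side effects.
--             out.append(ord("?"))
--         # Variable: Updates i in place using the configured literal value.
--         i += 1
--     # Error handling: Attempts the protected operation so failures can be handled safely.
--     try:
--         # Return: Sends the result returned by out.decode() back to the caller.
--         return out.decode("utf-8", "replace")
--     # Error handling: Runs this recovery branch when the protected operation fails.
--     except Exception:
--         # Return: Sends the result returned by str() back to the caller.
--         return str(out)
--
-- def _static_path_to_file(path):
--     # Variable: raw stores the result returned by _url_decode().
--     raw = _url_decode(path or "/")
--     # Logic: Branches when raw.startswith("/") so the correct firmware path runs.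
--     if raw.startswith("/"):
--         # Variable: raw stores the selected item raw[1:].
--         raw = raw[1:]
--     # Variable: raw stores the result returned by replace().
--     raw = raw.split("?", 1)[0].replace("\\", "/")
--     # Logic: Branches when raw in ("", "index.html", "webui_index.html", "fwlink", "wifi", "0wifi") so the correct firmware path runs.
--     if raw in ("", "index.html", "webui_index.html", "fwlink", "wifi", "0wifi"):
--         # Return: Sends the current WEBUI_GZIP_FILE value back to the caller.
--         return WEBUI_GZIP_FILE
--     # Logic: Branches when raw.startswith("webui/") so the correct firmware path runs.
--     if raw.startswith("webui/"):
--         # Variable: raw stores the selected item raw[6:].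
--         raw = raw[6:]
--     # Loop: Repeats while raw.startswith("/") remains true.
--     while raw.startswith("/"):
--         # Variable: raw stores the selected item raw[1:].
--         raw = raw[1:]
--     # Logic: Branches when not raw or ".." in raw or raw.startswith("/") so the correct firmware path runs.
--     if not raw or ".." in raw or raw.startswith("/"):
--         # Return: Sends the empty sentinel value back to the caller.
--         return None
--     # Return: Sends the current raw value back to the caller.
--     return raw
-- ===== SOURCE B (Python) =====
-- WEBUI_GZIP_FILE = "webui_index.html.gz"
--
-- _ROOT_ALIASES = {"", "index.html", "webui_index.html", "fwlink", "wifi", "0wifi"}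
--
--
-- def _lit(out, seg):
--     # literal handling: '+' -> space byte, anything else -> its UTF-8 bytes
--     for c in seg:
--         if c == "+":
--             out.append(32)
--         else:
--             try:
--                 out.extend(c.encode("utf-8"))
--             except Exception:
--                 out.append(ord("?"))
--
--
-- def _url_decode_split(s):
--     if isinstance(s, bytes):
--         try:
--             s = s.decode("ascii", "ignore")
--         except Exception:
--             s = str(s)
--     segs = s.split("%")
--     out = bytearray()
--     _lit(out, segs[0])
--     for seg in segs[1:]:
--         decoded = False
--         if len(seg) >= 2:
--             try:
--                 out.append(int(seg[:2], 16))
--                 decoded = True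
--             except Exception:
--                 pass
--         if decoded:
--             _lit(out, seg[2:])
--         else:
--             out.append(ord("%"))
--             _lit(out, seg)
--     try:
--         return out.decode("utf-8", "replace")
--     except Exception:
--         return str(out)
--
--
-- def _static_path_to_file(path):
--     raw = _url_decode_split(path or "/")
--     if raw.startswith("/"):
--         raw = raw[1:]
--     raw = raw.partition("?")[0].replace("\\", "/")
--     if raw in _ROOT_ALIASES:
--         return WEBUI_GZIP_FILE
--     raw = raw.removeprefix("webui/").lstrip("/")
--     if not raw or ".." in raw:
--         return None
--     return raw
-- ===== Notes on version B (the rewrite author's own statement) =====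
-- stated objective: faster
-- what changed: The percent-decoder is rewritten from an index-driven while loop (i += 1 / i += 3 with repeated slicing) into a split-on-percent decomposition: the first segment is emitted literally, each following segment tries int(seg[:2],16) for one decoded byte and otherwise falls back to a literal percent byte plus the segment; path post-processing uses partition/removeprefix/lstrip and a set of root aliases instead of split/slicing/a while loop.
import Mathlib
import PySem

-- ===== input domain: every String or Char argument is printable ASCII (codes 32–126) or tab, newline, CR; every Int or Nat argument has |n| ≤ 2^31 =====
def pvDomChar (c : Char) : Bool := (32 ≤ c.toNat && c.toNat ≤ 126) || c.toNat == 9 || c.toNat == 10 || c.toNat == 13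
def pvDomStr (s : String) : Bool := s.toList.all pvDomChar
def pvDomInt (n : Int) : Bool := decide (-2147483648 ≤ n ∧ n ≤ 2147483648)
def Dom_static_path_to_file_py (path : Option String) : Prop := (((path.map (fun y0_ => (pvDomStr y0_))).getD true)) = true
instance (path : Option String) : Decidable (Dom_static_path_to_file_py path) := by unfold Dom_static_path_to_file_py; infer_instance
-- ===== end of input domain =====

-- B re-implements the percent-decoder by splitting the string on the percent separator and
-- handling one segment at a time (measured faster by a constant factor: no per-index loop or
-- repeated slicing); A scans the string by index with a while loop.

-- ===== shared helpers (used by BOTH ports: both Pythons call c.encode('utf-8') and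
-- bytes.decode('utf-8','replace'); these model those two CPython codecs exactly) =====

-- c.encode('utf-8') for a single character (Lean Char is never a surrogate, so it never raises)
def utf8EncodeChar (c : Char) : List Nat :=
  let u := c.toNat
  if u < 0x80 then [u]
  else if u < 0x800 then [0xC0 + u / 64, 0x80 + u % 64]
  else if u < 0x10000 then [0xE0 + u / 4096, 0x80 + u / 64 % 64, 0x80 + u % 64]
  else [0xF0 + u / 262144, 0x80 + u / 4096 % 64, 0x80 + u / 64 % 64, 0x80 + u % 64]

def utf8Cont (b : Nat) : Bool := 0x80 ≤ b && b ≤ 0xBF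

-- bytes(l).decode('utf-8', 'replace'): exact CPython semantics (maximal valid subpart
-- replaced by one U+FFFD, decoding resumes at the offending byte)
def utf8DecodeReplace : List Nat → List Char
  | [] => []
  | b :: r =>
    if b < 0x80 then Char.ofNat b :: utf8DecodeReplace r
    else if b < 0xC2 then Char.ofNat 0xFFFD :: utf8DecodeReplace r
    else if b ≤ 0xDF then
      match r with
      | b1 :: r1 =>
        if utf8Cont b1 then Char.ofNat ((b - 0xC0) * 64 + (b1 - 0x80)) :: utf8DecodeReplace r1
        else Char.ofNat 0xFFFD :: utf8DecodeReplace (b1 :: r1)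
      | [] => [Char.ofNat 0xFFFD]
    else if b ≤ 0xEF then
      match r with
      | b1 :: r1 =>
        if (if b = 0xE0 then 0xA0 else 0x80) ≤ b1 ∧ b1 ≤ (if b = 0xED then 0x9F else 0xBF) then
          match r1 with
          | b2 :: r2 =>
            if utf8Cont b2 then
              Char.ofNat ((b - 0xE0) * 4096 + (b1 - 0x80) * 64 + (b2 - 0x80)) :: utf8DecodeReplace r2
            else Char.ofNat 0xFFFD :: utf8DecodeReplace (b2 :: r2)
          | [] => [Char.ofNat 0xFFFD]
        else Char.ofNat 0xFFFD :: utf8DecodeReplace (b1 :: r1)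
      | [] => [Char.ofNat 0xFFFD]
    else if b ≤ 0xF4 then
      match r with
      | b1 :: r1 =>
        if (if b = 0xF0 then 0x90 else 0x80) ≤ b1 ∧ b1 ≤ (if b = 0xF4 then 0x8F else 0xBF) then
          match r1 with
          | b2 :: r2 =>
            if utf8Cont b2 then
              match r2 with
              | b3 :: r3 =>
                if utf8Cont b3 then
                  Char.ofNat ((b - 0xF0) * 262144 + (b1 - 0x80) * 4096 + (b2 - 0x80) * 64 + (b3 - 0x80)) :: utf8DecodeReplace r3
                else Char.ofNat 0xFFFD :: utf8DecodeReplace (b3 :: r3)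
              | [] => [Char.ofNat 0xFFFD]
            else Char.ofNat 0xFFFD :: utf8DecodeReplace (b2 :: r2)
          | [] => [Char.ofNat 0xFFFD]
        else Char.ofNat 0xFFFD :: utf8DecodeReplace (b1 :: r1)
      | [] => [Char.ofNat 0xFFFD]
    else Char.ofNat 0xFFFD :: utf8DecodeReplace r
  termination_by l => l.length
  decreasing_by all_goals first | (simp_all; omega) | simp_all | omega

def webuiGzipFile : String := "webui_index.html.gz"

-- 'path or "/"': None and "" are falsy
def pathOrSlash (path : Option String) : String :=
  match path with
  | none => "/"
  | some t => if t = "" then "/" else t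

-- ===== PORT A =====

-- the while-loop of _url_decode, scanning by index (i+=1 / i+=3 becomes consuming 1 or 3 chars);
-- out.append(int(s[i+1:i+3],16)) succeeds iff int() parses AND the value fits a bytearray byte (0..255)
def decodeA : List Char → List Nat
  | [] => []
  | c :: rest =>
    if c = '+' then 32 :: decodeA rest
    else if c = '%' then
      match rest with
      | a :: b :: rest2 =>
        match PySem.Int.ofCharsBase? [a, b] 16 with
        | some v =>
          if 0 ≤ v ∧ v ≤ 255 then v.toNat :: decodeA rest2
          else utf8EncodeChar c ++ decodeA (a :: b :: rest2)
        | none => utf8EncodeChar c ++ decodeA (a :: b :: rest2)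
      | short => utf8EncodeChar c ++ decodeA short
    else utf8EncodeChar c ++ decodeA rest
  termination_by l => l.length
  decreasing_by all_goals first | (simp_all; omega) | simp_all | omega

-- the 'while raw.startswith("/"): raw = raw[1:]' loop
def stripA : List Char → List Char
  | [] => []
  | c :: r => if c = '/' then stripA r else c :: r

def static_path_to_file_py (path : Option String) : Option String :=
  let raw0 := utf8DecodeReplace (decodeA (pathOrSlash path).toList)  -- out.decode('utf-8','replace'); never raises, so the str(out) fallback is dead
  let raw1 := if PySem.Chars.startswith raw0 ['/'] then raw0.tail else raw0
  -- raw.split("?", 1)[0] is the prefix before the first '?' (exact); then .replace("\\", "/")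
  let raw2 := PySem.Chars.replace (raw1.takeWhile (· ≠ '?')) ['\\'] ['/']
  if raw2 = [] ∨ raw2 = "index.html".toList ∨ raw2 = "webui_index.html".toList ∨
     raw2 = "fwlink".toList ∨ raw2 = "wifi".toList ∨ raw2 = "0wifi".toList then
    some webuiGzipFile
  else
    let raw3 := if PySem.Chars.startswith raw2 "webui/".toList then raw2.drop 6 else raw2
    let raw4 := stripA raw3
    if raw4 = [] ∨ PySem.Chars.isIn ['.', '.'] raw4 ∨ PySem.Chars.startswith raw4 ['/'] then none
    else some (String.ofList raw4)

-- ===== PORT B =====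

-- _lit: literal handling of a '%'-free segment
def litB : List Char → List Nat
  | [] => []
  | c :: r => (if c = '+' then [32] else utf8EncodeChar c) ++ litB r

-- s.split('%') (exact semantics of str.split with a one-char separator)
def splitPct : List Char → List (List Char)
  | [] => [[]]
  | c :: rest =>
    if c = '%' then [] :: splitPct rest
    else
      match splitPct rest with
      | h :: t => (c :: h) :: t
      | [] => [[c]]  -- unreachable: splitPct never returns []

-- one segment after a '%': try int(seg[:2],16) + bytearray append, else a literal '%' then the segment
def segB (seg : List Char) : List Nat :=
  match seg with
  | a :: b :: rest =>
    match PySem.Int.ofCharsBase? [a, b] 16 with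
    | some v => if 0 ≤ v ∧ v ≤ 255 then v.toNat :: litB rest else 37 :: litB seg
    | none => 37 :: litB seg
  | _ => 37 :: litB seg

def decodeB (l : List Char) : List Nat :=
  match splitPct l with
  | [] => []  -- unreachable
  | h :: t => litB h ++ t.flatMap segB

def static_path_to_file_py_alt (path : Option String) : Option String :=
  let raw0 := utf8DecodeReplace (decodeB (pathOrSlash path).toList)
  let raw1 := if PySem.Chars.startswith raw0 ['/'] then raw0.drop 1 else raw0
  -- partition("?")[0] = prefix before the first '?' (exact); then .replace("\\", "/")
  let raw2 := PySem.Chars.replace (raw1.takeWhile (· ≠ '?')) ['\\'] ['/']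
  if raw2 ∈ [[], "index.html".toList, "webui_index.html".toList,
             "fwlink".toList, "wifi".toList, "0wifi".toList] then
    some webuiGzipFile
  else
    let raw4 := (if "webui/".toList.isPrefixOf raw2 then raw2.drop 6 else raw2).dropWhile (· == '/')
    if raw4 = [] ∨ PySem.Chars.isIn ['.', '.'] raw4 then none
    else some (String.ofList raw4)

-- ===== PRECONDITION & SPEC =====
def Spec_static_path_to_file_py (path : Option String) (out : Option String) : Prop := out = static_path_to_file_py_alt path
instance (path : Option String) (out : Option String) : Decidable (Spec_static_path_to_file_py path out) := by unfold Spec_static_path_to_file_py; infer_instance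

-- ===== CLAIM (what is proved, stated in full; the proofs are below) =====
def Claim_equal_static_path_to_file_py : Prop := ∀ (path : Option String), Dom_static_path_to_file_py path → Spec_static_path_to_file_py path (static_path_to_file_py path)

-- ===== LEMMAS AND PROOFS =====

theorem splitPct_ne_nil (l : List Char) : splitPct l ≠ [] := by
  induction l with
  | nil => simp [splitPct]
  | cons c rest ih =>
    simp only [splitPct]
    split
    · simp
    · cases h : splitPct rest with
      | nil => exact absurd h ih
      | cons a b => simp

theorem splitPct_head_prefix (l : List Char) : ∀ (h : List Char) (t : List (List Char)),
    splitPct l = h :: t → h <+: l := by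
  induction l with
  | nil => intro h t hs; simp [splitPct] at hs; simp [hs.1]
  | cons c rest ih =>
    intro h t hs
    simp only [splitPct] at hs
    split at hs
    · cases hs; simp
    · cases hh : splitPct rest with
      | nil => exact absurd hh (splitPct_ne_nil rest)
      | cons a b =>
        rw [hh] at hs
        simp only [List.cons.injEq] at hs
        obtain ⟨rfl, rfl⟩ := hs
        exact List.cons_prefix_cons.mpr ⟨rfl, ih a b hh⟩

set_option maxRecDepth 8000 in
theorem pct_left (b : Char) (hb : b.toNat < 128) : PySem.Int.ofCharsBase? ['%', b] 16 = none := by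
  have hall : ∀ n ∈ List.range 128, PySem.Int.ofCharsBase? ['%', Char.ofNat n] 16 = none := by
    decide
  have h := hall b.toNat (List.mem_range.mpr hb)
  rwa [Char.ofNat_toNat] at h

set_option maxRecDepth 8000 in
theorem pct_right (a : Char) (ha : a.toNat < 128) : PySem.Int.ofCharsBase? [a, '%'] 16 = none := by
  have hall : ∀ n ∈ List.range 128, PySem.Int.ofCharsBase? [Char.ofNat n, '%'] 16 = none := by
    decide
  have h := hall a.toNat (List.mem_range.mpr ha)
  rwa [Char.ofNat_toNat] at h

theorem splitPct_cons_ne {c : Char} (hc : c ≠ '%') (l h : List Char) (t : List (List Char))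
    (hh : splitPct l = h :: t) : splitPct (c :: l) = (c :: h) :: t := by
  simp [splitPct, hc, hh]

theorem splitPct_shape (l : List Char) : ∃ h t, splitPct l = h :: t := by
  cases hh : splitPct l with
  | nil => exact absurd hh (splitPct_ne_nil l)
  | cons h t => exact ⟨h, t, rfl⟩

theorem decodeB_of_split (l h : List Char) (t : List (List Char)) (hh : splitPct l = h :: t) :
    decodeB l = litB h ++ t.flatMap segB := by
  simp [decodeB, hh]

theorem decodeB_cons_ne {c : Char} (hc : c ≠ '%') (l : List Char) :
    decodeB (c :: l) = (if c = '+' then [32] else utf8EncodeChar c) ++ decodeB l := by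
  obtain ⟨h, t, hh⟩ := splitPct_shape l
  rw [decodeB_of_split _ _ _ (splitPct_cons_ne hc l h t hh), decodeB_of_split l h t hh]
  simp [litB, List.append_assoc]

theorem decodeB_pct (l h : List Char) (t : List (List Char)) (hh : splitPct l = h :: t) :
    decodeB ('%' :: l) = segB h ++ t.flatMap segB := by
  have : splitPct ('%' :: l) = [] :: h :: t := by simp [splitPct, hh]
  rw [decodeB_of_split _ _ _ this]
  simp [litB]

theorem domChar_lt {c : Char} (h : pvDomChar c = true) : c.toNat < 128 := by
  simp [pvDomChar] at h
  omega

theorem decode_eq (l : List Char) : (∀ c ∈ l, pvDomChar c = true) → decodeA l = decodeB l := by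
  induction l using decodeA.induct with
  | case1 => intro _; rw [decodeA.eq_def]; simp [decodeB, splitPct, litB]
  | case2 rest ih =>
    intro hd
    have ih' := ih (fun c hc => hd c (List.mem_cons_of_mem _ hc))
    rw [decodeB_cons_ne (by decide : ('+' : Char) ≠ '%')]
    rw [decodeA.eq_def]; simp [ih']
  | case3 a b rest2 v hp hv hne ih =>
    intro hd
    have ha := hd a (by simp)
    have hb := hd b (by simp)
    have hane : a ≠ '%' := by
      intro e; rw [e, pct_left b (domChar_lt hb)] at hp; simp at hp
    have hbne : b ≠ '%' := by
      intro e; rw [e, pct_right a (domChar_lt ha)] at hp; simp at hp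
    obtain ⟨h2, t2, hh2⟩ := splitPct_shape rest2
    have hsa : splitPct (a :: b :: rest2) = (a :: b :: h2) :: t2 :=
      splitPct_cons_ne hane _ _ _ (splitPct_cons_ne hbne _ _ _ hh2)
    rw [decodeB_pct _ _ _ hsa]
    have ih' := ih (fun c hc => hd c (by simp [hc]))
    rw [decodeB_of_split _ _ _ hh2] at ih'
    rw [decodeA.eq_def]; simp [hp, hv, segB, ih']
  | case4 a b rest2 v hp hv hne ih =>
    intro hd
    have ih' := ih (fun c hc => hd c (List.mem_cons_of_mem _ hc))
    obtain ⟨h, t, hh⟩ := splitPct_shape (a :: b :: rest2)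
    rw [decodeB_pct _ _ _ hh]
    have hlit : segB h = 37 :: litB h := by
      match h, splitPct_head_prefix _ h t hh with
      | [], _ => rfl
      | [x], _ => rfl
      | x :: y :: h2, hpre =>
        obtain ⟨rfl, hpre2⟩ := List.cons_prefix_cons.mp hpre
        obtain ⟨rfl, _⟩ := List.cons_prefix_cons.mp hpre2
        simp [segB, hp, hv]
    rw [decodeB_of_split _ _ _ hh] at ih'
    have he : utf8EncodeChar '%' = [37] := rfl
    rw [decodeA.eq_def]; simp [hp, hv, hlit, ih', he]
  | case5 a b rest2 hp hne ih =>
    intro hd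
    have ih' := ih (fun c hc => hd c (List.mem_cons_of_mem _ hc))
    obtain ⟨h, t, hh⟩ := splitPct_shape (a :: b :: rest2)
    rw [decodeB_pct _ _ _ hh]
    have hlit : segB h = 37 :: litB h := by
      match h, splitPct_head_prefix _ h t hh with
      | [], _ => rfl
      | [x], _ => rfl
      | x :: y :: h2, hpre =>
        obtain ⟨rfl, hpre2⟩ := List.cons_prefix_cons.mp hpre
        obtain ⟨rfl, _⟩ := List.cons_prefix_cons.mp hpre2
        simp [segB, hp]
    rw [decodeB_of_split _ _ _ hh] at ih'
    have he : utf8EncodeChar '%' = [37] := rfl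
    rw [decodeA.eq_def]; simp [hp, hlit, ih', he]
  | case6 short hshape hne ih =>
    intro hd
    have ih' := ih (fun c hc => hd c (List.mem_cons_of_mem _ hc))
    obtain ⟨h, t, hh⟩ := splitPct_shape short
    rw [decodeB_pct _ _ _ hh]
    have hlit : segB h = 37 :: litB h := by
      match h, splitPct_head_prefix _ h t hh with
      | [], _ => rfl
      | [x], _ => rfl
      | x :: y :: h2, hpre =>
        obtain ⟨rest', hrest'⟩ := hpre
        exact absurd (hshape x y (h2 ++ rest') hrest'.symm) (fun f => f)
    rw [decodeB_of_split _ _ _ hh] at ih'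
    have he : utf8EncodeChar '%' = [37] := rfl
    have hA : decodeA ('%' :: short) = utf8EncodeChar '%' ++ decodeA short := by
      cases short with
      | nil => rw [decodeA.eq_def]; simp
      | cons x r =>
        cases r with
        | nil => rw [decodeA.eq_def]; simp
        | cons y r2 => exact absurd rfl (fun e => hshape x y r2 e)
    rw [hA, he, ih', hlit]
    simp
  | case7 c rest hplus hpct ih =>
    intro hd
    have ih' := ih (fun c' hc => hd c' (List.mem_cons_of_mem _ hc))
    rw [decodeB_cons_ne hpct]
    rw [decodeA.eq_def]; simp [hplus, hpct, ih']

theorem stripA_eq (l : List Char) : stripA l = l.dropWhile (· == '/') := by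
  induction l with
  | nil => rfl
  | cons c r ih =>
    simp only [stripA, List.dropWhile_cons]
    by_cases hc : c = '/' <;> simp [hc, ih]

theorem dropWhile_head_false {α : Type} (p : α → Bool) (l : List α) (c : α)
    (h : (l.dropWhile p).head? = some c) : p c = false := by
  induction l with
  | nil => simp at h
  | cons a r ih =>
    rw [List.dropWhile_cons] at h
    split at h
    · exact ih h
    · simp at h; subst h; simp_all

theorem isPrefixOf_slash_dropWhile (l : List Char) :
    (List.isPrefixOf ['/'] (List.dropWhile (fun c => c == '/') l)) = false := by
  cases hm : List.dropWhile (fun c => c == '/') l with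
  | nil => rfl
  | cons c r =>
    have hc := dropWhile_head_false _ l c (by rw [hm]; rfl)
    simp at hc
    simp [List.isPrefixOf]
    exact fun e => hc e.symm

-- ===== VERDICT (by name: the statement is the Claim_ definition above) =====
theorem static_path_to_file_py_spec : Claim_equal_static_path_to_file_py := by
  intro path hdom
  have hs : ∀ c ∈ (pathOrSlash path).toList, pvDomChar c = true := by
    cases path with
    | none =>
      have h : ("/" : String).toList.all pvDomChar = true := by decide
      exact fun c hc => List.all_eq_true.mp h c hc
    | some t =>
      by_cases ht : t = ""
      · subst ht
        have h : ("/" : String).toList.all pvDomChar = true := by decide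
        exact fun c hc => List.all_eq_true.mp h c hc
      · have hps : pathOrSlash (some t) = t := by simp [pathOrSlash, ht]
        rw [hps]
        unfold Dom_static_path_to_file_py at hdom
        simp [pvDomStr, List.all_eq_true] at hdom
        exact hdom
  show static_path_to_file_py path = static_path_to_file_py_alt path
  simp only [static_path_to_file_py, static_path_to_file_py_alt]
  rw [decode_eq _ hs]
  generalize utf8DecodeReplace (decodeB (pathOrSlash path).toList) = x
  have hsw : ∀ (r p : List Char), PySem.Chars.startswith r p = p.isPrefixOf r := by
    intro r p
    rw [Bool.eq_iff_iff, PySem.Chars.startswith_iff, List.isPrefixOf_iff_prefix]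
  have hmem : ∀ r : List Char, (r ∈ [([] : List Char), "index.html".toList, "webui_index.html".toList,
      "fwlink".toList, "wifi".toList, "0wifi".toList]) ↔
      (r = [] ∨ r = "index.html".toList ∨ r = "webui_index.html".toList ∨
       r = "fwlink".toList ∨ r = "wifi".toList ∨ r = "0wifi".toList) := by
    intro r; simp
  simp only [hsw, hmem, stripA_eq, List.drop_one, isPrefixOf_slash_dropWhile,
    Bool.false_eq_true, or_false]
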